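-- pv_equiv track=rewrite | github.com/RIshimoto/AtCoder_myPractice | ABC/ABC260/random_checker.py | solve_Jury
-- ===== SOURCE A (Python) =====
-- def solve_Jury(N, K, P):
--     yamafudas = [[float('inf')] for _ in range(N)]
--     ans = [-1] * (N + 1)
--     for turn, X in enumerate(P, 1):
--         for yamafuda in yamafudas:
--             if X <= yamafuda[-1] and len(yamafuda) - 1 < K:
--                 yamafuda.append(X)
--                 if len(yamafuda) - 1 == K:
--                     for x in yamafuda[1:]:
--                         ans[x] = turn
--                 break
--     return ans[1:]
-- ===== SOURCE B (Python) =====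
-- from bisect import bisect_left
--
-- def solve_Jury(N, K, P):
--     # Patience-style: started, unfinished piles kept sorted by top card.
--     piles = []        # (top, contents), tops strictly increasing
--     fresh = N         # piles that have not received a card yet (top = +inf)
--     done = {}         # card value -> turn its pile was completed
--     for turn, X in enumerate(P, 1):
--         i = bisect_left(piles, X, key=lambda p: p[0])
--         if i < len(piles):
--             top, pile = piles[i]
--             pile.append(X)
--             if len(pile) == K:
--                 for x in pile:
--                     done[x] = turn
--                 piles.pop(i)
--             else:
--                 piles[i] = (X, pile)
--         elif fresh > 0:
--             fresh -= 1
--             if K == 1: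
--                 done[X] = turn
--             else:
--                 piles.append((X, [X]))
--     return [done.get(x, -1) for x in range(1, N + 1)]
-- ===== Notes on version B (the rewrite author's own statement) =====
-- stated objective: faster
-- what changed: Instead of linearly scanning all N piles (with their sentinels) for every card, B keeps only the started, unfinished piles in a list sorted by top card plus a counter of untouched piles, finds the target pile by binary search (bisect_left), and records completion turns in a dict read out once at the end; correctness rests on the patience-sorting invariant that unfinished pile tops are strictly increasing, so the leftmost pile with top >= X is the one with the smallest such top.
-- outside the precondition, e.g. on solve_Jury(3, 1, [-1]): A returns [-1, -1, 1], B returns [-1, -1, -1]; on solve_Jury(3, 1, [4]): A raises IndexError, B returns [-1, -1, -1]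
import Mathlib
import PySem

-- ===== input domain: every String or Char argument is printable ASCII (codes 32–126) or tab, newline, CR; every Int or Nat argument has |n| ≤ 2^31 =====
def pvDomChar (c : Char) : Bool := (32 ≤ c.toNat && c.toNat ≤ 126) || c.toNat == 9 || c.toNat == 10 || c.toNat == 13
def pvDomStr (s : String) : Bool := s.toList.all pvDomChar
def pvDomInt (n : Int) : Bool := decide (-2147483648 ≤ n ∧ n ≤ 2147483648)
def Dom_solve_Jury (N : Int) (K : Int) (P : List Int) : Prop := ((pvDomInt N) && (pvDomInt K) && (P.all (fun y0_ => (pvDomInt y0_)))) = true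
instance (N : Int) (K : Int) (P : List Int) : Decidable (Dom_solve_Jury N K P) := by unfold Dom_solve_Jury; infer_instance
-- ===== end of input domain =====

-- B replaces A's linear scan over all N piles by a bisect on the (started, unfinished)
-- piles kept sorted by top card, plus a counter of untouched piles and a dict of
-- completion turns: asymptotically faster, same return value on Pre_.

-- ===== PORT A =====
-- A pile 'yamafuda' is stored WITHOUT its float('inf') sentinel: 'X <= yamafuda[-1]'
-- is true when the pile is empty (top = +inf), otherwise compares with the last card;
-- 'len(yamafuda) - 1' is the stored length; 'yamafuda[1:]' is the stored pile.
-- Python 'ans[x] = turn' is PySem.List.pySetD (exact while the index is in range;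
-- out-of-range raise is excluded by Pre_).
def placeA (K : Int) (turn : Int) (X : Int) : List (List Int) → List Int → List (List Int) × List Int
  | [], ans => ([], ans)
  | p :: ps, ans =>
    if (p = [] ∨ X ≤ p.getLastD 0) ∧ (p.length : Int) < K then
      let p' := p ++ [X]
      if (p'.length : Int) = K then
        (p' :: ps, p'.foldl (fun a x => PySem.List.pySetD a x turn) ans)
      else (p' :: ps, ans)
    else
      match placeA K turn X ps ans with
      | (ps', ans') => (p :: ps', ans')

def solve_Jury (N : Int) (K : Int) (P : List Int) : List Int :=
  let init := (List.replicate N.toNat ([] : List Int), List.replicate (N + 1).toNat (-1 : Int))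
  let fin := (PySem.List.enumerate P 1).foldl (fun st tx => placeA K tx.1 tx.2 st.1 st.2) init
  PySem.List.slice fin.2 (some 1) none

-- ===== PORT B =====
-- Source B's bisect_left(piles, X, key=top) on the strictly-increasing tops is the index of
-- the first pile with top ≥ X, i.e. List.findIdx (contract of the library call).
def stepB (K : Int) (st : List (Int × List Int) × Int × PySem.Dict Int Int) (tx : Int × Int) :
    List (Int × List Int) × Int × PySem.Dict Int Int :=
  let piles := st.1
  let fresh := st.2.1
  let done := st.2.2
  let turn := tx.1
  let X := tx.2
  let i := piles.findIdx (fun p => decide (X ≤ p.1))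
  if h : i < piles.length then
    let c' := piles[i].2 ++ [X]
    if (c'.length : Int) = K then
      (piles.eraseIdx i, fresh, c'.foldl (fun d x => d.insert x turn) done)
    else
      (piles.set i (X, c'), fresh, done)
  else if 0 < fresh then
    if K = 1 then (piles, fresh - 1, done.insert X turn)
    else (piles ++ [(X, [X])], fresh - 1, done)
  else (piles, fresh, done)

def solve_Jury_alt (N : Int) (K : Int) (P : List Int) : List Int :=
  let fin := (PySem.List.enumerate P 1).foldl (stepB K) (([] : List (Int × List Int)), N, (PySem.Dict.empty : PySem.Dict Int Int))
  (PySem.List.pyRange 1 (N + 1) 1).map (fun x => fin.2.2.getD x (-1))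

-- ===== PRECONDITION & SPEC =====
-- When N > 0 and a pile can complete (len(P) ≥ K), Pre_ restricts the card values to
-- the problem's natural domain 0..N: a card above N (or below -(N+1)) makes A raise
-- IndexError when its pile completes, and a negative card hits Python's negative-index
-- wraparound (writing ans[N]), an artefact of A's implementation.
def Pre_solve_Jury (N : Int) (K : Int) (P : List Int) : Prop :=
  N ≤ 0 ∨ (P.length : Int) < K ∨ ∀ x ∈ P, 0 ≤ x ∧ x ≤ N
instance (N : Int) (K : Int) (P : List Int) : Decidable (Pre_solve_Jury N K P) := by
  unfold Pre_solve_Jury; infer_instance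

def pvWitness_solve_Jury : Int × Int × List Int := (3, 2, [1, 3, 2])

def Spec_solve_Jury (N : Int) (K : Int) (P : List Int) (out : List Int) : Prop := out = solve_Jury_alt N K P
instance (N : Int) (K : Int) (P : List Int) (out : List Int) : Decidable (Spec_solve_Jury N K P out) := by unfold Spec_solve_Jury; infer_instance

-- ===== CLAIM (what is proved, stated in full; the proofs are below) =====
def Claim_equal_solve_Jury : Prop := ∀ (N : Int) (K : Int) (P : List Int), Dom_solve_Jury N K P → Pre_solve_Jury N K P → Spec_solve_Jury N K P (solve_Jury N K P)

-- ===== LEMMAS AND PROOFS =====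

-- The simulation argument: A's N piles are (started piles) ++ (untouched piles);
-- B's state keeps exactly the started piles that are not yet full (activeOf), the
-- number of untouched piles (fresh) and the recorded answers (done).

def goodPile (N : Int) (K : Int) (p : List Int) : Prop :=
  p ≠ [] ∧ (p.length : Int) ≤ K ∧ ∀ x ∈ p, 0 ≤ x ∧ x ≤ N

def activeOf (K : Int) (started : List (List Int)) : List (Int × List Int) :=
  started.filterMap (fun p => if (p.length : Int) < K then some (p.getLastD 0, p) else none)

def AnsRel (N : Int) (ans : List Int) (done : PySem.Dict Int Int) : Prop :=
  ans.length = (N + 1).toNat ∧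
  ∀ j : Int, 1 ≤ j → j ≤ N → PySem.List.pyGetD ans j 0 = done.getD j (-1)

lemma ansRel_set (N : Int) (ans : List Int) (done : PySem.Dict Int Int) (x t : Int)
    (h : AnsRel N ans done) (hx0 : 0 ≤ x) (hxN : x ≤ N) (hN : 0 ≤ N) :
    AnsRel N (PySem.List.pySetD ans x t) (done.insert x t) := by
  obtain ⟨hlen, hpt⟩ := h
  refine ⟨by rw [PySem.List.length_pySetD]; exact hlen, ?_⟩
  intro j h1 h2
  have hxe : ((x.toNat : Nat) : Int) = x := Int.toNat_of_nonneg hx0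
  have hje : ((j.toNat : Nat) : Int) = j := Int.toNat_of_nonneg (by omega)
  have hxl : x.toNat < ans.length := by rw [hlen]; omega
  rw [← hxe, ← hje, PySem.List.pyGetD_pySetD_natCast ans x.toNat j.toNat t 0 hxl,
    hxe, hje, PySem.Dict.getD_insert]
  by_cases hjx : j = x
  · simp [hjx]
  · have : ¬ j.toNat = x.toNat := by omega
    simp [this, hjx]
    rw [← hje]
    exact hje ▸ hpt j h1 h2

lemma ansRel_fold (N : Int) (l : List Int) (t : Int) (hN : 0 ≤ N) :
    ∀ (ans : List Int) (done : PySem.Dict Int Int), AnsRel N ans done →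
    (∀ x ∈ l, 0 ≤ x ∧ x ≤ N) →
    AnsRel N (l.foldl (fun a x => PySem.List.pySetD a x t) ans)
      (l.foldl (fun d x => d.insert x t) done) := by
  induction l with
  | nil => intro ans done h _; exact h
  | cons y ys ih =>
    intro ans done h hmem
    exact ih _ _ (ansRel_set N ans done y t h (hmem y (by simp)).1 (hmem y (by simp)).2 hN)
      (fun x hx => hmem x (by simp [hx]))

lemma stepB_nil (K fresh turn X : Int) (done : PySem.Dict Int Int) :
    stepB K ([], fresh, done) (turn, X) =
      if 0 < fresh then
        (if K = 1 then ([], fresh - 1, done.insert X turn)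
         else ([(X, [X])], fresh - 1, done))
      else ([], fresh, done) := by
  unfold stepB
  simp

lemma stepB_cons_hit (K : Int) (a : Int × List Int) (l : List (Int × List Int))
    (fresh turn X : Int) (done : PySem.Dict Int Int) (hhit : X ≤ a.1) :
    stepB K (a :: l, fresh, done) (turn, X) =
      (if ((a.2 ++ [X]).length : Int) = K then
        (l, fresh, (a.2 ++ [X]).foldl (fun d x => d.insert x turn) done)
       else ((X, a.2 ++ [X]) :: l, fresh, done)) := by
  have hd : decide (X ≤ a.1) = true := by simpa using hhit
  unfold stepB
  simp only [List.findIdx_cons, hd, cond_true]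
  simp

lemma stepB_cons_skip (K : Int) (a : Int × List Int) (l : List (Int × List Int))
    (fresh turn X : Int) (done : PySem.Dict Int Int) (hmiss : ¬ X ≤ a.1) :
    stepB K (a :: l, fresh, done) (turn, X) =
      ((a :: (stepB K (l, fresh, done) (turn, X)).1),
        (stepB K (l, fresh, done) (turn, X)).2) := by
  have hd : decide (X ≤ a.1) = false := by simpa using hmiss
  unfold stepB
  simp only [List.findIdx_cons, hd, cond_false]
  by_cases hi : List.findIdx (fun p => decide (X ≤ p.1)) l < l.length
  · have h1 : List.findIdx (fun p => decide (X ≤ p.1)) l + 1 < (a :: l).length := by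
      simp only [List.length_cons]; omega
    simp only [dif_pos h1, dif_pos hi, List.getElem_cons_succ, List.eraseIdx_cons_succ,
      List.set_cons_succ]
    split <;> rfl
  · have he : List.findIdx (fun p => decide (X ≤ p.1)) l = l.length := by
      have := List.findIdx_le_length (p := fun q => decide (X ≤ q.1)) (xs := l)
      omega
    have h1 : ¬ (List.findIdx (fun p => decide (X ≤ p.1)) l + 1 < (a :: l).length) := by
      simp only [List.length_cons, not_lt]; omega
    simp only [dif_neg h1, dif_neg hi]
    by_cases hf : 0 < fresh
    · by_cases hk : K = 1 <;> simp [hf, hk]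
    · simp [hf]

lemma activeOf_nil (K : Int) : activeOf K [] = [] := rfl

lemma activeOf_cons_active (K : Int) (p : List Int) (rest : List (List Int))
    (h : (p.length : Int) < K) :
    activeOf K (p :: rest) = (p.getLastD 0, p) :: activeOf K rest := by
  simp [activeOf, h]

lemma activeOf_cons_full (K : Int) (p : List Int) (rest : List (List Int))
    (h : ¬ (p.length : Int) < K) :
    activeOf K (p :: rest) = activeOf K rest := by
  simp [activeOf, h]

lemma core (N K turn X : Int) (hK : 1 ≤ K) (hN : 0 ≤ N) (hX0 : 0 ≤ X) (hXN : X ≤ N) :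
    ∀ (started : List (List Int)) (m : Nat) (ans : List Int) (done : PySem.Dict Int Int),
    (∀ p ∈ started, goodPile N K p) → AnsRel N ans done →
    ∃ started' m',
      (placeA K turn X (started ++ List.replicate m []) ans).1
        = started' ++ List.replicate m' [] ∧
      (∀ p ∈ started', goodPile N K p) ∧
      (stepB K (activeOf K started, (m : Int), done) (turn, X)).1 = activeOf K started' ∧
      (stepB K (activeOf K started, (m : Int), done) (turn, X)).2.1 = (m' : Int) ∧
      AnsRel N (placeA K turn X (started ++ List.replicate m []) ans).2
        (stepB K (activeOf K started, (m : Int), done) (turn, X)).2.2 := by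
  intro started
  induction started with
  | nil =>
    intro m ans done hgood hans
    rw [activeOf_nil]
    cases m with
    | zero =>
      refine ⟨[], 0, ?_, by simp, ?_, ?_, ?_⟩ <;>
        simp [placeA, stepB_nil, activeOf_nil, hans]
    | succ m0 =>
      have hK0 : (0 : Int) < K := by omega
      have hrep : List.replicate (m0 + 1) ([] : List Int) = [] :: List.replicate m0 [] :=
        List.replicate_succ ..
      have hfr : (0 : Int) < ((m0 + 1 : Nat) : Int) := by push_cast; omega
      have hplace : placeA K turn X (List.replicate (m0 + 1) ([] : List Int)) ans
          = (if (1 : Int) = K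
             then ([X] :: List.replicate m0 [], PySem.List.pySetD ans X turn)
             else ([X] :: List.replicate m0 [], ans)) := by
        rw [hrep]
        simp [placeA, hK0]
      by_cases hk1 : (1 : Int) = K
      · refine ⟨[[X]], m0, ?_, ?_, ?_, ?_, ?_⟩
        · rw [List.nil_append, hplace, if_pos hk1]; rfl
        · intro p hp; simp at hp; subst hp
          exact ⟨by simp, by simp; omega, by simp; omega⟩
        · rw [stepB_nil, if_pos hfr, if_pos hk1.symm]
          simp [activeOf, ← hk1]
        · rw [stepB_nil, if_pos hfr, if_pos hk1.symm]
          simp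
        · rw [stepB_nil, if_pos hfr, if_pos hk1.symm, List.nil_append, hplace, if_pos hk1]
          exact ansRel_set N ans done X turn hans hX0 hXN hN
      · refine ⟨[[X]], m0, ?_, ?_, ?_, ?_, ?_⟩
        · rw [List.nil_append, hplace, if_neg hk1]; rfl
        · intro p hp; simp at hp; subst hp
          exact ⟨by simp, by simp; omega, by simp; omega⟩
        · rw [stepB_nil, if_pos hfr, if_neg (fun h => hk1 h.symm)]
          simp only [activeOf, List.filterMap_cons, List.filterMap_nil]
          rw [if_pos (by simp; omega)]
          simp
        · rw [stepB_nil, if_pos hfr, if_neg (fun h => hk1 h.symm)]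
          simp
        · rw [stepB_nil, if_pos hfr, if_neg (fun h => hk1 h.symm), List.nil_append, hplace,
            if_neg hk1]
          exact hans
  | cons p rest ih =>
    intro m ans done hgood hans
    obtain ⟨hne, hlek, hvals⟩ := hgood p (by simp)
    have hgrest : ∀ q ∈ rest, goodPile N K q := fun q hq => hgood q (by simp [hq])
    by_cases hact : (p.length : Int) < K
    · rw [activeOf_cons_active K p rest hact]
      by_cases htop : X ≤ p.getLastD 0
      · -- A places on p; B hits index 0
        have hcond : (p = [] ∨ X ≤ p.getLastD 0) ∧ ((p.length : Int) < K) :=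
          ⟨Or.inr htop, hact⟩
        have hA : placeA K turn X (p :: (rest ++ List.replicate m [])) ans =
            (if ((p ++ [X]).length : Int) = K
             then ((p ++ [X]) :: (rest ++ List.replicate m []),
               (p ++ [X]).foldl (fun a x => PySem.List.pySetD a x turn) ans)
             else ((p ++ [X]) :: (rest ++ List.replicate m []), ans)) := by
          simp only [placeA]
          rw [if_pos hcond]
        have hgp' : ∀ x ∈ p ++ [X], 0 ≤ x ∧ x ≤ N := by
          intro x hx
          rcases List.mem_append.1 hx with h | h
          · exact hvals x h
          · simp at h; subst h; exact ⟨hX0, hXN⟩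
        rw [stepB_cons_hit K _ _ _ _ _ _ htop]
        by_cases hful : (((p ++ [X]).length : Int)) = K
        · refine ⟨(p ++ [X]) :: rest, m, ?_, ?_, ?_, ?_, ?_⟩
          · rw [List.cons_append, hA, if_pos hful]; rfl
          · intro q hq
            rcases List.mem_cons.1 hq with h | h
            · subst h; exact ⟨by simp, by omega, hgp'⟩
            · exact hgrest q h
          · rw [if_pos hful, activeOf_cons_full K _ _ (by omega)]
          · rw [if_pos hful]
          · rw [if_pos hful, List.cons_append, hA, if_pos hful]
            exact ansRel_fold N (p ++ [X]) turn hN ans done hans hgp'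
        · have hlt : (((p ++ [X]).length : Int)) < K := by simp at hful ⊢; omega
          refine ⟨(p ++ [X]) :: rest, m, ?_, ?_, ?_, ?_, ?_⟩
          · rw [List.cons_append, hA, if_neg hful]; rfl
          · intro q hq
            rcases List.mem_cons.1 hq with h | h
            · subst h; exact ⟨by simp, by omega, hgp'⟩
            · exact hgrest q h
          · rw [if_neg hful, activeOf_cons_active K _ _ hlt]
            simp
          · rw [if_neg hful]
          · rw [if_neg hful, List.cons_append, hA, if_neg hful]
            exact hans
      · -- B skips the head; A's condition is false too
        have hcond : ¬ ((p = [] ∨ X ≤ p.getLastD 0) ∧ ((p.length : Int) < K)) := by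
          rintro ⟨h | h, -⟩
          · exact hne h
          · exact htop h
        have hA : placeA K turn X (p :: (rest ++ List.replicate m [])) ans =
            (p :: (placeA K turn X (rest ++ List.replicate m []) ans).1,
              (placeA K turn X (rest ++ List.replicate m []) ans).2) := by
          simp only [placeA]
          rw [if_neg hcond]
        rw [stepB_cons_skip K _ _ _ _ _ _ htop]
        obtain ⟨started'', m'', c1, c2, c3, c4, c5⟩ := ih m ans done hgrest hans
        refine ⟨p :: started'', m'', ?_, ?_, ?_, c4, ?_⟩
        · rw [List.cons_append, hA, c1]; rfl
        · intro q hq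
          rcases List.mem_cons.1 hq with h | h
          · subst h; exact ⟨hne, hlek, hvals⟩
          · exact c2 q h
        · rw [activeOf_cons_active K p started'' hact, c3]
        · rw [List.cons_append, hA]
          exact c5
    · -- p is full: invisible to B, skipped by A
      rw [activeOf_cons_full K p rest hact]
      have hcond : ¬ ((p = [] ∨ X ≤ p.getLastD 0) ∧ ((p.length : Int) < K)) := by
        rintro ⟨-, h⟩; exact hact h
      have hA : placeA K turn X (p :: (rest ++ List.replicate m [])) ans =
          (p :: (placeA K turn X (rest ++ List.replicate m []) ans).1,
            (placeA K turn X (rest ++ List.replicate m []) ans).2) := by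
        simp only [placeA]
        rw [if_neg hcond]
      obtain ⟨started'', m'', c1, c2, c3, c4, c5⟩ := ih m ans done hgrest hans
      refine ⟨p :: started'', m'', ?_, ?_, ?_, c4, ?_⟩
      · rw [List.cons_append, hA, c1]; rfl
      · intro q hq
        rcases List.mem_cons.1 hq with h | h
        · subst h; exact ⟨hne, hlek, hvals⟩
        · exact c2 q h
      · rw [activeOf_cons_full K p started'' hact, c3]
      · rw [List.cons_append, hA]
        exact c5

def SimRel (N K : Int) (stA : List (List Int) × List Int)
    (stB : List (Int × List Int) × Int × PySem.Dict Int Int) : Prop :=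
  ∃ started m,
    stA.1 = started ++ List.replicate m ([] : List Int) ∧
    (∀ p ∈ started, goodPile N K p) ∧
    stB.1 = activeOf K started ∧
    stB.2.1 = (m : Int) ∧
    AnsRel N stA.2 stB.2.2

lemma main_fold (N K : Int) (hK : 1 ≤ K) (hN : 0 ≤ N) :
    ∀ (L : List (Int × Int)), (∀ tx ∈ L, 0 ≤ tx.2 ∧ tx.2 ≤ N) →
    ∀ stA stB, SimRel N K stA stB →
    SimRel N K (L.foldl (fun st tx => placeA K tx.1 tx.2 st.1 st.2) stA)
      (L.foldl (stepB K) stB) := by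
  intro L
  induction L with
  | nil => intro _ stA stB h; exact h
  | cons tx L ih =>
    intro hmem stA stB h
    obtain ⟨started, m, h1, h2, h3, h4, h5⟩ := h
    obtain ⟨started', m', c1, c2, c3, c4, c5⟩ :=
      core N K tx.1 tx.2 hK hN (hmem tx (by simp)).1 (hmem tx (by simp)).2 started m stA.2 stB.2.2 h2 h5
    simp only [List.foldl_cons]
    refine ih (fun q hq => hmem q (by simp [hq])) _ _ ?_
    refine ⟨started', m', ?_, c2, ?_, ?_, ?_⟩
    · rw [h1]; exact c1
    · have : stB = (stB.1, stB.2.1, stB.2.2) := rfl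
      rw [this, h3, h4]; exact c3
    · have : stB = (stB.1, stB.2.1, stB.2.2) := rfl
      rw [this, h3, h4]; exact c4
    · have : stB = (stB.1, stB.2.1, stB.2.2) := rfl
      rw [h1, this, h3, h4]; exact c5

lemma out_eq (N : Int) (hN : 0 ≤ N) (ans : List Int) (done : PySem.Dict Int Int)
    (h : AnsRel N ans done) :
    PySem.List.slice ans (some 1) none
      = (PySem.List.pyRange 1 (N + 1) 1).map (fun x => done.getD x (-1)) := by
  obtain ⟨hlen, hpt⟩ := h
  rw [PySem.List.slice_from_one]
  apply List.ext_getElem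
  · simp [PySem.List.length_pyRange_one, hlen]
    omega
  · intro k h1 h2
    have hk : k + 1 < ans.length := by simp at h1; omega
    have hkN : ((k : Int) + 1) ≤ N := by
      rw [hlen] at hk; omega
    have hgd := hpt ((k : Int) + 1) (by omega) hkN
    rw [PySem.List.pyGetD_eq_getElem ans 0 (by omega) (by omega)] at hgd
    have htn : ((k : Int) + 1).toNat = k + 1 := by omega
    simp only [htn] at hgd
    simp only [List.getElem_tail, List.getElem_map, PySem.List.getElem_pyRange_one]
    rw [hgd]
    congr 1
    omega

lemma easy_N_nonpos (N K : Int) (P : List Int) (hN : N ≤ 0) :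
    solve_Jury N K P = [] ∧ solve_Jury_alt N K P = [] := by
  have hA : ∀ (L : List (Int × Int)) (ans : List Int),
      L.foldl (fun st tx => placeA K tx.1 tx.2 st.1 st.2) (([] : List (List Int)), ans)
        = ([], ans) := by
    intro L
    induction L with
    | nil => intro ans; rfl
    | cons tx L ihl => intro ans; simpa [placeA] using ihl ans
  have hB : ∀ (L : List (Int × Int)),
      L.foldl (stepB K) (([] : List (Int × List Int)), N, (PySem.Dict.empty : PySem.Dict Int Int))
        = ([], N, PySem.Dict.empty) := by
    intro L
    induction L with
    | nil => rfl
    | cons tx L ihl =>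
      have hst : stepB K (([] : List (Int × List Int)), N, (PySem.Dict.empty : PySem.Dict Int Int)) tx
          = ([], N, PySem.Dict.empty) := by
        rw [show tx = (tx.1, tx.2) from rfl, stepB_nil, if_neg (by omega)]
      simpa [hst] using ihl
  have htn : N.toNat = 0 := by omega
  constructor
  · unfold solve_Jury
    rw [htn]
    simp only [List.replicate_zero, hA, PySem.List.slice_from_one]
    have : (N + 1).toNat = 0 ∨ (N + 1).toNat = 1 := by omega
    rcases this with h | h <;> simp [h]
  · unfold solve_Jury_alt
    rw [hB]
    rw [PySem.List.pyRange_one_eq_nil (by omega)]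
    rfl

lemma easy_K_nonpos (N K : Int) (P : List Int) (hN : 0 ≤ N) (hK : K ≤ 0) :
    solve_Jury N K P = solve_Jury_alt N K P := by
  have hplace : ∀ (t X : Int) (ys : List (List Int)) (ans : List Int),
      placeA K t X ys ans = (ys, ans) := by
    intro t X ys
    induction ys with
    | nil => intro ans; rfl
    | cons p ps ihl =>
      intro ans
      have hcond : ¬ ((p = [] ∨ X ≤ p.getLastD 0) ∧ ((p.length : Int) < K)) := by
        rintro ⟨-, h⟩; omega
      simp only [placeA]
      rw [if_neg hcond, ihl ans]
  have hA : ∀ (L : List (Int × Int)) (st : List (List Int) × List Int),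
      L.foldl (fun st tx => placeA K tx.1 tx.2 st.1 st.2) st = st := by
    intro L
    induction L with
    | nil => intro st; rfl
    | cons tx L ihl =>
      intro st
      rw [List.foldl_cons, hplace, Prod.mk.eta]
      exact ihl st
  have hstep : ∀ (st : List (Int × List Int) × Int × PySem.Dict Int Int) (tx : Int × Int),
      (stepB K st tx).2.2 = st.2.2 := by
    intro st tx
    unfold stepB
    by_cases hfound : List.findIdx (fun p => decide (tx.2 ≤ p.1)) st.1 < st.1.length
    · rw [dif_pos hfound]
      rw [if_neg (by simp; omega)]
    · rw [dif_neg hfound]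
      by_cases hf : 0 < st.2.1
      · rw [if_pos hf, if_neg (by omega)]
      · rw [if_neg hf]
  have hB : ∀ (L : List (Int × Int)) (st : List (Int × List Int) × Int × PySem.Dict Int Int),
      (L.foldl (stepB K) st).2.2 = st.2.2 := by
    intro L
    induction L with
    | nil => intro st; rfl
    | cons tx L ihl => intro st; rw [List.foldl_cons, ihl, hstep]
  unfold solve_Jury solve_Jury_alt
  simp only [hA, hB, PySem.List.slice_from_one]
  have htail : (List.replicate (N + 1).toNat (-1 : Int)).tail
      = List.replicate N.toNat (-1 : Int) := by
    have : (N + 1).toNat = N.toNat + 1 := by omega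
    rw [this, List.replicate_succ, List.tail_cons]
  rw [htail]
  have : ∀ x : Int, (PySem.Dict.empty : PySem.Dict Int Int).getD x (-1) = -1 := fun x =>
    PySem.Dict.getD_empty x (-1)
  simp only [this]
  rw [List.map_const']
  rw [PySem.List.length_pyRange_one]
  congr 1
  omega

lemma placeA_small (K t X c : Int) (hc : 1 ≤ c) :
    ∀ (yam : List (List Int)) (ans : List Int),
    (∀ p ∈ yam, (p.length : Int) + c < K) →
    (placeA K t X yam ans).2 = ans ∧
    ∀ q ∈ (placeA K t X yam ans).1, (q.length : Int) + (c - 1) < K := by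
  intro yam
  induction yam with
  | nil => intro ans _; exact ⟨rfl, by simp [placeA]⟩
  | cons p ps ihl =>
    intro ans h
    have hp := h p (by simp)
    have hps : ∀ q ∈ ps, (q.length : Int) + c < K := fun q hq => h q (by simp [hq])
    by_cases hcond : (p = [] ∨ X ≤ p.getLastD 0) ∧ ((p.length : Int) < K)
    · have hful : ¬ (((p ++ [X]).length : Int) = K) := by simp; omega
      have hA : placeA K t X (p :: ps) ans =
          (if ((p ++ [X]).length : Int) = K
           then ((p ++ [X]) :: ps, (p ++ [X]).foldl (fun a x => PySem.List.pySetD a x t) ans)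
           else ((p ++ [X]) :: ps, ans)) := by
        simp only [placeA]
        rw [if_pos hcond]
      rw [hA, if_neg hful]
      refine ⟨rfl, ?_⟩
      intro q hq
      rcases List.mem_cons.1 hq with hh | hh
      · subst hh; simp; omega
      · have := hps q hh; omega
    · have hA : placeA K t X (p :: ps) ans =
          (p :: (placeA K t X ps ans).1, (placeA K t X ps ans).2) := by
        simp only [placeA]
        rw [if_neg hcond]
      rw [hA]
      obtain ⟨ih1, ih2⟩ := ihl ans hps
      refine ⟨ih1, ?_⟩
      intro q hq
      rcases List.mem_cons.1 hq with hh | hh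
      · subst hh; omega
      · exact ih2 q hh

lemma foldA_small (K : Int) :
    ∀ (L : List (Int × Int)) (yam : List (List Int)) (ans : List Int),
    (∀ p ∈ yam, (p.length : Int) + L.length < K) →
    (L.foldl (fun st tx => placeA K tx.1 tx.2 st.1 st.2) (yam, ans)).2 = ans := by
  intro L
  induction L with
  | nil => intro yam ans _; rfl
  | cons tx L ihl =>
    intro yam ans h
    have h' : ∀ p ∈ yam, (p.length : Int) + ((L.length : Int) + 1) < K := by
      intro p hp; have := h p hp; simp at this ⊢; omega
    obtain ⟨h1, h2⟩ := placeA_small K tx.1 tx.2 ((L.length : Int) + 1) (by omega) yam ans h'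
    rw [List.foldl_cons]
    have hpair : placeA K tx.1 tx.2 yam ans = ((placeA K tx.1 tx.2 yam ans).1, ans) :=
      Prod.ext rfl h1
    rw [hpair]
    exact ihl _ ans (by intro p hp; have := h2 p hp; omega)

lemma stepB_small (K turn X c : Int) (hc : 1 ≤ c) (hcK : c < K)
    (piles : List (Int × List Int)) (fresh : Int) (done : PySem.Dict Int Int)
    (h : ∀ q ∈ piles, (q.2.length : Int) + c < K) :
    (stepB K (piles, fresh, done) (turn, X)).2.2 = done ∧
    ∀ q ∈ (stepB K (piles, fresh, done) (turn, X)).1, (q.2.length : Int) + (c - 1) < K := by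
  unfold stepB
  by_cases hi : List.findIdx (fun p => decide (X ≤ p.1)) piles < piles.length
  · rw [dif_pos hi]
    have hq := h _ (List.getElem_mem hi)
    have hful : ¬ (((piles[List.findIdx (fun p => decide (X ≤ p.1)) piles].2 ++ [X]).length : Int) = K) := by
      simp; omega
    rw [if_neg hful]
    refine ⟨rfl, ?_⟩
    intro q hq'
    rcases List.mem_or_eq_of_mem_set hq' with hh | hh
    · have := h q hh; omega
    · subst hh; simp; omega
  · rw [dif_neg hi]
    by_cases hf : 0 < fresh
    · rw [if_pos hf, if_neg (by omega : ¬ K = 1)]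
      refine ⟨rfl, ?_⟩
      intro q hq'
      rcases List.mem_append.1 hq' with hh | hh
      · have := h q hh; omega
      · simp at hh; subst hh; simp; omega
    · rw [if_neg hf]
      exact ⟨rfl, fun q hq' => by have := h q hq'; omega⟩

lemma foldB_small (K : Int) :
    ∀ (L : List (Int × Int)) (piles : List (Int × List Int)) (fresh : Int)
      (done : PySem.Dict Int Int),
    ((L.length : Int) < K) →
    (∀ q ∈ piles, (q.2.length : Int) + L.length < K) →
    (L.foldl (stepB K) (piles, fresh, done)).2.2 = done := by
  intro L
  induction L with
  | nil => intro piles fresh done _ _; rfl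
  | cons tx L ihl =>
    intro piles fresh done hK h
    have hlen : ((L.length : Int) + 1) < K := by simp at hK; omega
    have h' : ∀ q ∈ piles, (q.2.length : Int) + ((L.length : Int) + 1) < K := by
      intro q hq; have := h q hq; simp at this ⊢; omega
    obtain ⟨h1, h2⟩ := stepB_small K tx.1 tx.2 ((L.length : Int) + 1) (by omega)
      hlen piles fresh done h'
    rw [List.foldl_cons]
    have hpair : stepB K (piles, fresh, done) tx
        = ((stepB K (piles, fresh, done) tx).1,
           (stepB K (piles, fresh, done) tx).2.1, done) := by
      refine Prod.ext rfl (Prod.ext rfl ?_)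
      rw [show tx = (tx.1, tx.2) from rfl]
      exact h1
    rw [hpair]
    exact ihl _ _ done (by omega) (by
      intro q hq
      have := h2 q (by rw [show tx = (tx.1, tx.2) from rfl] at hq; exact hq)
      omega)

lemma easy_small (N K : Int) (P : List Int) (hN : 0 ≤ N) (hK : (P.length : Int) < K) :
    solve_Jury N K P = solve_Jury_alt N K P := by
  unfold solve_Jury solve_Jury_alt
  have hlenE : (PySem.List.enumerate P 1).length = P.length := PySem.List.length_enumerate ..
  have hA := foldA_small K (PySem.List.enumerate P 1) (List.replicate N.toNat [])
    (List.replicate (N + 1).toNat (-1)) (by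
      intro p hp
      have := List.eq_of_mem_replicate hp
      subst this
      simp [hlenE]; omega)
  have hB := foldB_small K (PySem.List.enumerate P 1) [] N PySem.Dict.empty
    (by rw [hlenE]; omega) (by simp)
  simp only [hA, hB, PySem.List.slice_from_one]
  have htail : (List.replicate (N + 1).toNat (-1 : Int)).tail
      = List.replicate N.toNat (-1 : Int) := by
    have : (N + 1).toNat = N.toNat + 1 := by omega
    rw [this, List.replicate_succ, List.tail_cons]
  rw [htail]
  have : ∀ x : Int, (PySem.Dict.empty : PySem.Dict Int Int).getD x (-1) = -1 := fun x =>
    PySem.Dict.getD_empty x (-1)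
  simp only [this]
  rw [List.map_const', PySem.List.length_pyRange_one]
  congr 1
  omega

-- ===== VERDICT (by name: the statement is the Claim_ definition above) =====
theorem solve_Jury_spec : Claim_equal_solve_Jury := by
  intro N K P _ hpre
  unfold Spec_solve_Jury
  by_cases hN : N ≤ 0
  · obtain ⟨e1, e2⟩ := easy_N_nonpos N K P hN
    rw [e1, e2]
  · have hN' : 0 ≤ N := by omega
    by_cases hsmall : (P.length : Int) < K
    · exact easy_small N K P (by omega) hsmall
    have hrange : ∀ x ∈ P, 0 ≤ x ∧ x ≤ N := by
      rcases hpre with h | h | h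
      · omega
      · exact absurd h hsmall
      · exact h
    by_cases hK : K ≤ 0
    · exact easy_K_nonpos N K P hN' hK
    · have hK' : 1 ≤ K := by omega
      have hinit : SimRel N K (List.replicate N.toNat ([] : List Int), List.replicate (N + 1).toNat (-1 : Int))
          (([] : List (Int × List Int)), N, (PySem.Dict.empty : PySem.Dict Int Int)) := by
        refine ⟨[], N.toNat, by simp, by simp, rfl, by simp [Int.toNat_of_nonneg hN'], ?_, ?_⟩
        · simp
        · intro j h1 h2
          have hlen : (j : Int) < ((List.replicate (N + 1).toNat (-1 : Int)).length : Int) := by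
            simp; omega
          rw [PySem.List.pyGetD_eq_getElem _ 0 (by omega) hlen]
          simp
      have hmem : ∀ tx ∈ PySem.List.enumerate P 1, 0 ≤ tx.2 ∧ tx.2 ≤ N := by
        intro tx htx
        have : tx.2 ∈ P := by
          have := PySem.List.map_snd_enumerate P 1
          exact this ▸ List.mem_map_of_mem htx
        exact hrange _ this
      have hfin := main_fold N K hK' hN' (PySem.List.enumerate P 1) hmem _ _ hinit
      obtain ⟨started, m, _, _, _, _, h5⟩ := hfin
      unfold solve_Jury solve_Jury_alt
      exact out_eq N hN' _ _ h5
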